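-- pv_equiv track=rewrite | github.com/rajdip20/InfyTQ_Problem_Solved | Python_Fundamentals/Day_7/PROBLEM_34.py | encrypt_sentence
-- ===== SOURCE A (Python) =====
-- def encrypt_sentence(sentence):
--     words = sentence.split(" ")
--     encrypt = []
--     for i in range(len(words)):
--         if i % 2 == 0:
--             encrypt.append(words[i][::-1])
--         else:
--             vowel_set = set("aeiouAEIOU")
--             vowels = []
--             consonants = []
--             for letter in words[i]:
--                 if letter in vowel_set:
--                     vowels.append(letter)
--                 else:
--                     consonants.append(letter)
--             encrypt.append("".join(consonants + vowels))
--     return " ".join(encrypt)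
-- ===== SOURCE B (Python) =====
-- def encrypt_sentence(sentence):
--     vowels = set("aeiouAEIOU")
--     return " ".join(
--         word[::-1] if i % 2 == 0 else "".join(sorted(word, key=lambda ch: ch in vowels))
--         for i, word in enumerate(sentence.split(" "))
--     )
-- ===== Notes on version B (the rewrite author's own statement) =====
-- stated objective: idiomatic
-- what changed: The odd-word consonant/vowel two-accumulator loop is replaced by a single stable sort keyed on vowel membership (consonants sort before vowels, stability keeps each group's order), and the word loop becomes a comprehension over enumerate.
import Mathlib
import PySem

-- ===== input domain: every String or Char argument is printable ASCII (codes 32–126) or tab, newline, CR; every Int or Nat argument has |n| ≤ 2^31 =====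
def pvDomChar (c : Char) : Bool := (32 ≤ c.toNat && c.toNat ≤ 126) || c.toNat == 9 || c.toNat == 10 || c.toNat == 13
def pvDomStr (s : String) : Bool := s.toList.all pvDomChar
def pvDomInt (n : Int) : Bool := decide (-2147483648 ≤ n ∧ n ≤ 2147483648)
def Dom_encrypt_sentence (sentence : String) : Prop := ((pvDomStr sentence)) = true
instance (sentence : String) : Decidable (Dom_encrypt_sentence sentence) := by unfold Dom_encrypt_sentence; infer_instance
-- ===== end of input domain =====

-- B replaces A's two-accumulator consonant/vowel loop on odd-indexed words by a stable sort on the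
-- boolean key "is a vowel" (idiomatic; same behaviour, no speed claim).

-- ===== PORT A =====
def encrypt_sentence (sentence : String) : String :=
  -- words = sentence.split(" ")  (separator " " ≠ "", so split? is always `some`)
  let words := (PySem.Str.split? sentence " ").getD []
  let encrypt := (PySem.List.pyRange 0 (PySem.List.len words) 1).foldl (fun acc i =>
    acc ++ [if PySem.Int.mod i 2 = 0 then
      -- words[i][::-1]
      (PySem.Str.slice? (PySem.List.pyGetD words i "") none none (-1)).getD ""
    else
      let vowel_set : PySem.Set Char := PySem.Set.ofList "aeiouAEIOU".toList
      let st := (PySem.List.pyGetD words i "").toList.foldl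
        (fun (st : List Char × List Char) letter =>
          if PySem.Set.contains vowel_set letter then (st.1 ++ [letter], st.2)
          else (st.1, st.2 ++ [letter])) ([], [])
      -- "".join(consonants + vowels)
      String.ofList (st.2 ++ st.1)]) []
  PySem.Str.join " " encrypt

-- ===== PORT B =====
def encrypt_sentence_alt (sentence : String) : String :=
  let vowels : PySem.Set Char := PySem.Set.ofList "aeiouAEIOU".toList
  PySem.Str.join " "
    ((PySem.List.enumerate ((PySem.Str.split? sentence " ").getD [])).map
      (fun p => if PySem.Int.mod p.1 2 = 0 then
          (PySem.Str.slice? p.2 none none (-1)).getD ""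
        else
          String.ofList (PySem.List.sorted p.2.toList
            (fun ch => PySem.Set.contains vowels ch) false)))

-- ===== PRECONDITION & SPEC =====
def Spec_encrypt_sentence (sentence : String) (out : String) : Prop := out = encrypt_sentence_alt sentence
instance (sentence : String) (out : String) : Decidable (Spec_encrypt_sentence sentence out) := by unfold Spec_encrypt_sentence; infer_instance

-- ===== CLAIM (what is proved, stated in full; the proofs are below) =====
def Claim_equal_encrypt_sentence : Prop := ∀ (sentence : String), Dom_encrypt_sentence sentence → Spec_encrypt_sentence sentence (encrypt_sentence sentence)

-- ===== LEMMAS AND PROOFS =====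

-- A's inner loop: two accumulators = the two filters, appended at the end.
theorem partition_foldl (key : Char → Bool) (cs V C : List Char) :
    cs.foldl (fun (st : List Char × List Char) letter =>
      if key letter then (st.1 ++ [letter], st.2) else (st.1, st.2 ++ [letter])) (V, C)
    = (V ++ cs.filter key, C ++ cs.filter (fun c => !key c)) := by
  induction cs generalizing V C with
  | nil => simp
  | cons c cs ih =>
    by_cases h : key c <;> simp [h, ih]

theorem insertBy_key_true (key : Char → Bool) (x : Char) (hx : key x = true) (ys : List Char) :
    PySem.List.insertBy (fun a b => decide (key a < key b)) x ys = ys ++ [x] := by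
  apply PySem.List.insertBy_of_forall_not_before
  intro y _
  rw [hx]; cases h : key y <;> simp

theorem insertBy_key_false (key : Char → Bool) (x : Char) (hx : key x = false)
    (C V : List Char) (hC : ∀ c ∈ C, key c = false) (hV : ∀ v ∈ V, key v = true) :
    PySem.List.insertBy (fun a b => decide (key a < key b)) x (C ++ V) = (C ++ [x]) ++ V := by
  induction C with
  | nil =>
    cases V with
    | nil => simp [PySem.List.insertBy]
    | cons v V' =>
      have hv := hV v (by simp)
      simp [PySem.List.insertBy, hx, hv]
  | cons c C' ih =>
    have hc := hC c (by simp)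
    simp only [List.cons_append, PySem.List.insertBy, hx, hc]
    rw [ih (fun d hd => hC d (by simp [hd]))]
    simp

-- B's insertion sort on a boolean key is exactly consonants-then-vowels, each in order.
theorem sorted_partition_foldl (key : Char → Bool) (cs : List Char) :
    ∀ (C V : List Char), (∀ c ∈ C, key c = false) → (∀ v ∈ V, key v = true) →
    cs.foldl (fun acc x => PySem.List.insertBy (fun a b => decide (key a < key b)) x acc) (C ++ V)
    = (C ++ cs.filter (fun c => !key c)) ++ (V ++ cs.filter key) := by
  induction cs with
  | nil => intro C V _ _; simp
  | cons x cs ih =>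
    intro C V hC hV
    by_cases h : key x
    · rw [List.foldl_cons, insertBy_key_true key x h (C ++ V)]
      rw [List.append_assoc, ih C (V ++ [x]) hC
        (by intro v hv; rcases List.mem_append.1 hv with h' | h'
            · exact hV v h'
            · simp at h'; simpa [h'])]
      simp [h]
    · rw [List.foldl_cons,
        insertBy_key_false key x (by simpa using h) C V hC hV,
        ih (C ++ [x]) V
          (by intro c hc; rcases List.mem_append.1 hc with h' | h'
              · exact hC c h'
              · simp at h'; simpa [h'] using h) hV]
      simp [h]

theorem sorted_eq_partition (key : Char → Bool) (cs : List Char) :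
    PySem.List.sorted cs key false = cs.filter (fun c => !key c) ++ cs.filter key := by
  rw [PySem.List.sorted_eq_foldl_insertBy]
  have := sorted_partition_foldl key cs [] [] (by simp) (by simp)
  simpa using this

theorem encrypt_sentence_eq (sentence : String) :
    encrypt_sentence sentence = encrypt_sentence_alt sentence := by
  simp only [encrypt_sentence, encrypt_sentence_alt]
  rw [PySem.List.enumerate_eq_map_pyRange ((PySem.Str.split? sentence " ").getD []) ""]
  rw [PySem.List.foldl_append_singleton_eq_map]
  rw [List.map_map]
  congr 1
  rw [List.nil_append]
  refine List.map_congr_left (fun i _ => ?_)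
  simp only [Function.comp_apply]
  by_cases h : PySem.Int.mod i 2 = 0
  · rw [if_pos h, if_pos h]
  · rw [if_neg h, if_neg h, partition_foldl, sorted_eq_partition]
    simp only [List.nil_append]

-- ===== VERDICT (by name: the statement is the Claim_ definition above) =====
theorem encrypt_sentence_spec : Claim_equal_encrypt_sentence := by
  intro s _
  unfold Spec_encrypt_sentence
  exact encrypt_sentence_eq s
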